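-- pv_equiv track=rewrite | github.com/koinos/koinos-erc20 | render_j2.py | find_q
-- ===== SOURCE A (Python) =====
-- import math
--
-- def find_q(i, n):
--     x = i
--     if (x%2) == 0:
--         x -= 1
--     chosen = []
--     while len(chosen) < n:
--         if all(math.gcd(a, x) == 1 for a in chosen):
--             chosen.append(x)
--         x -= 2
--     return chosen
-- ===== SOURCE B (Python) =====
-- import math
--
-- def find_q(i, n):
--     x = i if i % 2 else i - 1
--     p = 1
--     out = []
--     for _ in range(n):
--         while math.gcd(p, x) != 1:
--             x -= 2
--         out.append(x)
--         p *= x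
--         x -= 2
--     return out
-- ===== Notes on version B (the rewrite author's own statement) =====
-- stated objective: faster
-- what changed: B loops once per requested element (for _ in range(n)), scanning forward with a single gcd against the running product of chosen values to find each next element, instead of A's single while loop testing every candidate with one gcd per already-chosen element.
import Mathlib
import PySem

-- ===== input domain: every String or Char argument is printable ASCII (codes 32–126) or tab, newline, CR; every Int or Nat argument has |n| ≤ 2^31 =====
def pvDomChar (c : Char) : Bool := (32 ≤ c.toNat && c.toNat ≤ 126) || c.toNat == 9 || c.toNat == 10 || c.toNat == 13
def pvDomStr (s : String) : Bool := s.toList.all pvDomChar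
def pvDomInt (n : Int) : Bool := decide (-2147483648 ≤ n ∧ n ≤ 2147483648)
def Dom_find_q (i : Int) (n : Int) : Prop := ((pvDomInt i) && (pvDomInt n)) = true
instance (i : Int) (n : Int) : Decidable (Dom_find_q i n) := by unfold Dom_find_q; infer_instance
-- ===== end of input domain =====

-- B restructures A: one outer pass per requested element, an inner scan finding the next
-- candidate via a single gcd against the running product of chosen values (objective: faster,
-- one gcd per candidate instead of one per already-chosen element).
-- Both ports carry a fuel counter solely to make the (always-terminating) Python loops total
-- in Lean; fuel counts candidates examined, identically in both ports.

def pvFuel : Nat := 2 ^ 64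

-- ===== PORT A =====
def findQLoopA (n : Int) : Nat → Int → List Int → List Int
  | 0, _, chosen => chosen
  | fuel + 1, x, chosen =>
    if (chosen.length : Int) < n then
      findQLoopA n fuel (x - 2)
        (if chosen.all (fun a => Int.gcd a x == 1) then chosen ++ [x] else chosen)
    else chosen

def find_q (i : Int) (n : Int) : List Int :=
  findQLoopA n pvFuel (if i % 2 == 0 then i - 1 else i) []

-- ===== PORT B =====
-- inner `while math.gcd(p, x) != 1: x -= 2`: returns the found x and the unused fuel
def findQScanB : Nat → Int → Int → Option (Int × Nat)
  | 0, _, _ => none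
  | fuel + 1, p, x =>
    if Int.gcd p x == 1 then some (x, fuel) else findQScanB fuel p (x - 2)

-- outer `for _ in range(n)`: k elements still to produce
def findQBuildB : Nat → Nat → Int → Int → List Int
  | 0, _, _, _ => []
  | k + 1, fuel, p, x =>
    match findQScanB fuel p x with
    | none => []
    | some (y, fuel') => y :: findQBuildB k fuel' (p * y) (y - 2)

def find_q_alt (i : Int) (n : Int) : List Int :=
  findQBuildB n.toNat pvFuel 1 (if i % 2 == 0 then i - 1 else i)

-- ===== PRECONDITION & SPEC =====
def Spec_find_q (i : Int) (n : Int) (out : List Int) : Prop := out = find_q_alt i n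
instance (i : Int) (n : Int) (out : List Int) : Decidable (Spec_find_q i n out) := by unfold Spec_find_q; infer_instance

-- ===== CLAIM (what is proved, stated in full; the proofs are below) =====
def Claim_equal_find_q : Prop := ∀ (i : Int) (n : Int), Dom_find_q i n → Spec_find_q i n (find_q i n)

-- ===== LEMMAS AND PROOFS =====

-- gcd of a product with x is 1 iff each factor is coprime to x
theorem gcd_prod_eq_one_iff (l : List Int) (x : Int) :
    Int.gcd l.prod x = 1 ↔ ∀ a ∈ l, Int.gcd a x = 1 := by
  induction l with
  | nil => simp
  | cons a t ih =>
    simp only [List.prod_cons, List.mem_cons]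
    rw [← Int.isCoprime_iff_gcd_eq_one, IsCoprime.mul_left_iff,
        Int.isCoprime_iff_gcd_eq_one, Int.isCoprime_iff_gcd_eq_one, ih]
    constructor
    · rintro ⟨h1, h2⟩ b hb; rcases hb with rfl | hb; exact h1; exact h2 b hb
    · intro h; exact ⟨h a (Or.inl rfl), fun b hb => h b (Or.inr hb)⟩

theorem buildB_zero_fuel (k : Nat) (p x : Int) : findQBuildB k 0 p x = [] := by
  cases k <;> simp [findQBuildB, findQScanB]

-- both ports consume one fuel unit per candidate examined, so they agree for every fuel
theorem loopA_eq_buildB (n : Int) (fuel : Nat) :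
    ∀ (x : Int) (chosen : List Int),
      findQLoopA n fuel x chosen
        = chosen ++ findQBuildB (n - chosen.length).toNat fuel chosen.prod x := by
  induction fuel with
  | zero => intro x chosen; simp [findQLoopA, buildB_zero_fuel]
  | succ f ih =>
    intro x chosen
    simp only [findQLoopA]
    by_cases hlt : (chosen.length : Int) < n
    · rw [if_pos hlt]
      obtain ⟨m, hm⟩ : ∃ m, (n - chosen.length).toNat = m + 1 :=
        ⟨(n - chosen.length).toNat - 1, by omega⟩
      have hiff : (chosen.all (fun a => Int.gcd a x == 1) = true)
          ↔ (Int.gcd chosen.prod x == 1) = true := by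
        simp only [List.all_eq_true, beq_iff_eq]
        exact (gcd_prod_eq_one_iff chosen x).symm
      by_cases h : chosen.all (fun a => Int.gcd a x == 1) = true
      · rw [if_pos h, ih (x - 2) (chosen ++ [x])]
        have hscan : findQScanB (f + 1) chosen.prod x = some (x, f) := by
          simp [findQScanB, hiff.mp h]
        have hk : (n - ((chosen ++ [x]).length : Int)).toNat = m := by
          simp only [List.length_append, List.length_cons, List.length_nil]
          omega
        have hk' : (n - ((chosen.length : Int) + 1)).toNat = m := by omega
        simp [hm, findQBuildB, hscan, hk', List.prod_append]
      · rw [if_neg h, ih (x - 2) chosen]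
        have hg : (Int.gcd chosen.prod x == 1) = false := by
          by_contra hc
          exact h (hiff.mpr (by revert hc; cases Int.gcd chosen.prod x == 1 <;> simp))
        have hscan : findQScanB (f + 1) chosen.prod x = findQScanB f chosen.prod (x - 2) := by
          simp [findQScanB, hg]
        rw [hm]
        simp only [findQBuildB, hscan]
    · rw [if_neg hlt]
      have : (n - chosen.length).toNat = 0 := by omega
      simp [this, findQBuildB]

-- ===== VERDICT (by name: the statement is the Claim_ definition above) =====
theorem find_q_spec : Claim_equal_find_q := by
  intro i n _
  unfold Spec_find_q find_q find_q_alt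
  simpa using loopA_eq_buildB n pvFuel (if i % 2 == 0 then i - 1 else i) []
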